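-- pv_equiv track=rewrite | github.com/AtillaYasar/content-that-talks | puzzle pieces/tkinter_paragraph_mapper/main.py | idx_to_context
-- ===== SOURCE A (Python) =====
-- def idx_to_context(full_text, idx):
--     """Given text and idx, will return context that you can feed an AI model to generate a response."""
--
--     assert idx < len(full_text), "idx must be less than length of full_text"
--
--     # store paragraph boundaries
--     paragraphs = full_text.split('\n\n')
--     paragraph_starts = [0]
--     for paragraph in paragraphs:
--         paragraph_starts.append(paragraph_starts[-1] + len(paragraph) + 2)
--
--     # turn starts into ranges
--     paragraph_ranges = []
--     for i in range(len(paragraph_starts) - 1):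
--         paragraph_ranges.append((paragraph_starts[i], paragraph_starts[i + 1]))
--
--     # find paragraph that idx is in
--     for paragraph_range in paragraph_ranges:
--         if paragraph_range[0] <= idx <= paragraph_range[1]:
--             p_idx = paragraph_ranges.index(paragraph_range)
--             p = paragraphs[p_idx]
--             break
--
--     context = 'You are in paragraph ' + str(p_idx) + '. \n' + p
--     return context
-- ===== SOURCE B (Python) =====
-- def idx_to_context(full_text, idx):
--     """Given text and idx, will return context that you can feed an AI model to generate a response."""
--     assert idx < len(full_text), "idx must be less than length of full_text"
--     start = 0
--     for p_idx, p in enumerate(full_text.split('\n\n')):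
--         if idx <= start + len(p) + 2:
--             return 'You are in paragraph ' + str(p_idx) + '. \n' + p
--         start += len(p) + 2
-- ===== Notes on version B (the rewrite author's own statement) =====
-- stated objective: simpler
-- what changed: B replaces A's three passes (cumulative starts list, ranges list, linear range scan plus list.index lookup) by a single enumerate pass over the paragraphs that keeps a running start offset and returns at the first paragraph whose end bound covers idx.
import Mathlib
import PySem

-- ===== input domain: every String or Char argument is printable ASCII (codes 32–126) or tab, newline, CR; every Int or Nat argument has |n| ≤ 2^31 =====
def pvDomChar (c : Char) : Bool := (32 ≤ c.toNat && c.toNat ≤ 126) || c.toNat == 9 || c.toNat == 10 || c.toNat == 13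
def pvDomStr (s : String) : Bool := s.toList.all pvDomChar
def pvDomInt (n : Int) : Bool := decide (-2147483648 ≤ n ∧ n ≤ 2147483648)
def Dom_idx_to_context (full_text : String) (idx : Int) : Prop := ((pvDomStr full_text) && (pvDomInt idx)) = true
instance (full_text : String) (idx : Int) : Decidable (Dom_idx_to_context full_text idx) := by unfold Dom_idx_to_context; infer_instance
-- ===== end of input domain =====

-- B replaces A's three passes (starts list, ranges list, linear scan + list.index) by one
-- enumerate pass with a running offset (objective: simpler; return-value equivalence on Pre_).

-- ===== PORT A =====
-- A-side helper: the 'for paragraph_range in paragraph_ranges: if … break' loop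
def pvScanA (idx : Int) : List (Int × Int) → Option (Int × Int)
  | [] => none
  | r :: rest => if r.1 ≤ idx ∧ idx ≤ r.2 then some r else pvScanA idx rest

def idx_to_context (full_text : String) (idx : Int) : String :=
  if idx < PySem.Str.len full_text then  -- assert idx < len(full_text)
    let paragraphs := PySem.Chars.splitOn full_text.toList ['\n', '\n']
    let paragraph_starts := paragraphs.foldl
      (fun acc p => acc ++ [PySem.List.pyGetD acc (-1) 0 + (p.length : Int) + 2]) [(0 : Int)]
    let paragraph_ranges := (PySem.List.pyRange 0 (PySem.List.len paragraph_starts - 1)).foldl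
      (fun acc i => acc ++ [(PySem.List.pyGetD paragraph_starts i 0,
                             PySem.List.pyGetD paragraph_starts (i + 1) 0)]) []
    match pvScanA idx paragraph_ranges with
    | some r =>
      let p_idx : Nat := (PySem.List.index? paragraph_ranges r).getD 0
      let p : List Char := (PySem.List.pyGet? paragraphs (p_idx : Int)).getD []
      String.ofList ("You are in paragraph ".toList ++ PySem.Int.toChars (p_idx : Int)
                  ++ ". \n".toList ++ p)
    | none => ""  -- Python: UnboundLocalError (p_idx never assigned); excluded by Pre_
  else ""  -- Python: AssertionError; excluded by Pre_

-- ===== PORT B =====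
-- B-side helper: the enumerate loop with running offset 'start'
def pvScanB (idx : Int) : List (List Char) → Nat → Int → Option String
  | [], _, _ => none
  | p :: rest, k, start =>
    if idx ≤ start + (p.length : Int) + 2 then
      some (String.ofList ("You are in paragraph ".toList ++ PySem.Int.toChars (k : Int)
                        ++ ". \n".toList ++ p))
    else pvScanB idx rest (k + 1) (start + (p.length : Int) + 2)

def idx_to_context_alt (full_text : String) (idx : Int) : String :=
  if idx < PySem.Str.len full_text then  -- assert idx < len(full_text)
    (pvScanB idx (PySem.Chars.splitOn full_text.toList ['\n', '\n']) 0 0).getD ""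
  else ""  -- Python: AssertionError; excluded by Pre_

-- ===== PRECONDITION & SPEC =====
-- Pre_ excludes idx ≥ len(full_text) (A's assert raises AssertionError) and idx < 0
-- (A's loop never matches, so the read of p_idx after it raises UnboundLocalError).
def Pre_idx_to_context (full_text : String) (idx : Int) : Prop :=
  0 ≤ idx ∧ idx < PySem.Str.len full_text
instance (full_text : String) (idx : Int) : Decidable (Pre_idx_to_context full_text idx) := by
  unfold Pre_idx_to_context; infer_instance
def pvWitness_idx_to_context : String × Int := ("one\n\ntwo", 6)

def Spec_idx_to_context (full_text : String) (idx : Int) (out : String) : Prop :=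
  out = idx_to_context_alt full_text idx
instance (full_text : String) (idx : Int) (out : String) :
    Decidable (Spec_idx_to_context full_text idx out) := by
  unfold Spec_idx_to_context; infer_instance

-- ===== CLAIM (what is proved, stated in full; the proofs are below) =====
def Claim_equal_idx_to_context : Prop :=
  ∀ (full_text : String) (idx : Int), Dom_idx_to_context full_text idx →
    Pre_idx_to_context full_text idx →
    Spec_idx_to_context full_text idx (idx_to_context full_text idx)

-- ===== LEMMAS AND PROOFS =====

-- cumulative starts after the leading 0, as A's foldl produces them
def pvTail (s : Int) : List (List Char) → List Int
  | [] => []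
  | p :: rest => (s + (p.length : Int) + 2) :: pvTail (s + (p.length : Int) + 2) rest

-- A's ranges list, described structurally
def pvRanges (s : Int) : List (List Char) → List (Int × Int)
  | [] => []
  | p :: rest => (s, s + (p.length : Int) + 2) :: pvRanges (s + (p.length : Int) + 2) rest

-- common "first paragraph whose end bound covers idx" scan: (position, start, paragraph)
def pvHit (idx : Int) : List (List Char) → Int → Nat → Option (Nat × Int × List Char)
  | [], _, _ => none
  | p :: rest, s, k =>
    if idx ≤ s + (p.length : Int) + 2 then some (k, s, p)
    else pvHit idx rest (s + (p.length : Int) + 2) (k + 1)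

theorem pvTail_length (ps : List (List Char)) : ∀ s : Int, (pvTail s ps).length = ps.length := by
  induction ps with
  | nil => intro s; rfl
  | cons p rest ih => intro s; simp [pvTail, ih]

theorem pvStarts_eq (ps : List (List Char)) : ∀ (l : List Int) (s : Int),
    1 ≤ l.length → l.getLast? = some s →
    ps.foldl (fun acc p => acc ++ [PySem.List.pyGetD acc (-1) 0 + (p.length : Int) + 2]) l
      = l ++ pvTail s ps := by
  induction ps with
  | nil => intro l s _ _; simp [pvTail]
  | cons p rest ih =>
    intro l s hlen hlast
    have hget : PySem.List.pyGetD l (-1) 0 = s := by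
      rw [PySem.List.pyGetD_neg_ofNat l 1 0 (by omega) hlen]
      rw [List.getLast?_eq_getElem?] at hlast
      rw [List.getElem?_eq_getElem (by omega)] at hlast
      exact Option.some.inj hlast
    simp only [List.foldl_cons, hget]
    rw [ih (l ++ [s + (p.length : Int) + 2]) (s + (p.length : Int) + 2) (by simp) (by simp)]
    simp [pvTail]

theorem pvRanges_eq (ps : List (List Char)) : ∀ (s : Int),
    (List.range ps.length).map
        (fun (i : Nat) => (PySem.List.pyGetD (s :: pvTail s ps) ((i : Int)) 0,
                   PySem.List.pyGetD (s :: pvTail s ps) ((i : Int) + 1) 0))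
      = pvRanges s ps := by
  induction ps with
  | nil => intro s; simp [pvRanges]
  | cons p rest ih =>
    intro s
    simp only [List.length_cons]
    rw [List.range_succ_eq_map]
    simp only [List.map_cons, List.map_map]
    refine congrArg₂ _ ?_ ?_
    · rw [show ((0 : Nat) : Int) + 1 = ((1 : Nat) : Int) by norm_num,
          PySem.List.pyGetD_natCast, PySem.List.pyGetD_natCast]
      simp [pvTail]
    · rw [← ih (s + (p.length : Int) + 2)]
      refine List.map_congr_left ?_
      intro i _
      simp only [Function.comp_apply]
      rw [show ((i.succ : Nat) : Int) = ((i + 1 : Nat) : Int) by push_cast; ring]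
      rw [show (((i + 1 : Nat) : Int) + 1) = ((i + 2 : Nat) : Int) by push_cast; ring]
      rw [show ((i : Int) + 1) = ((i + 1 : Nat) : Int) by push_cast; ring]
      simp only [PySem.List.pyGetD_natCast]
      rw [show (s :: pvTail s (p :: rest))
            = s :: (s + (p.length : Int) + 2) :: pvTail (s + (p.length : Int) + 2) rest from rfl]
      simp

theorem pvScanA_eq (idx : Int) (ps : List (List Char)) : ∀ (s : Int) (k : Nat), s ≤ idx →
    pvScanA idx (pvRanges s ps)
      = (pvHit idx ps s k).map (fun t => (t.2.1, t.2.1 + (t.2.2.length : Int) + 2)) := by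
  induction ps with
  | nil => intro s k _; simp [pvRanges, pvScanA, pvHit]
  | cons p rest ih =>
    intro s k hs
    simp only [pvRanges, pvScanA, pvHit]
    by_cases h : idx ≤ s + (p.length : Int) + 2
    · simp [h, hs]
    · rw [if_neg (by tauto), if_neg h]
      exact ih _ (k + 1) (by omega)

theorem pvHit_index (idx : Int) (ps : List (List Char)) :
    ∀ (s : Int) (k j : Nat) (st : Int) (p : List Char),
    pvHit idx ps s k = some (j, st, p) →
    s ≤ st ∧ k ≤ j ∧
    PySem.List.index? (pvRanges s ps) (st, st + (p.length : Int) + 2) = some (j - k) ∧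
    ps[j - k]? = some p := by
  induction ps with
  | nil => intro s k j st p h; simp [pvHit] at h
  | cons q rest ih =>
    intro s k j st p h
    simp only [pvHit] at h
    by_cases hc : idx ≤ s + (q.length : Int) + 2
    · rw [if_pos hc] at h
      simp only [Option.some.injEq, Prod.mk.injEq] at h
      obtain ⟨h1, h2, h3⟩ := h
      subst h1; subst h2; subst h3
      refine ⟨le_refl _, le_refl _, ?_, by simp⟩
      rw [show pvRanges s (q :: rest)
            = (s, s + (q.length : Int) + 2) :: pvRanges (s + (q.length : Int) + 2) rest from rfl,
          PySem.List.index?_cons_self]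
      simp
    · rw [if_neg hc] at h
      obtain ⟨hst, hkj, hidx, hget⟩ := ih _ _ _ _ _ h
      have hlt : s < s + (q.length : Int) + 2 := by
        have : (0 : Int) ≤ (q.length : Int) := by positivity
        omega
      refine ⟨by omega, by omega, ?_, ?_⟩
      · rw [show pvRanges s (q :: rest)
              = (s, s + (q.length : Int) + 2) :: pvRanges (s + (q.length : Int) + 2) rest from rfl]
        rw [PySem.List.index?_cons_of_ne _ (by
          intro hEq
          have := congrArg Prod.fst hEq
          simp at this
          omega)]
        rw [hidx]
        simp only [Option.map_some]
        congr 1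
        omega
      · have : j - k = (j - (k + 1)) + 1 := by omega
        rw [this]
        simpa using hget

theorem pvScanB_eq (idx : Int) (ps : List (List Char)) : ∀ (s : Int) (k : Nat),
    pvScanB idx ps k s
      = (pvHit idx ps s k).map (fun t =>
          String.ofList ("You are in paragraph ".toList ++ PySem.Int.toChars ((t.1 : Nat) : Int)
                      ++ ". \n".toList ++ t.2.2)) := by
  induction ps with
  | nil => intro s k; simp [pvScanB, pvHit]
  | cons p rest ih =>
    intro s k
    simp only [pvScanB, pvHit]
    by_cases h : idx ≤ s + (p.length : Int) + 2
    · simp [h]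
    · rw [if_neg h, if_neg h]
      exact ih _ (k + 1)

-- ===== VERDICT (by name: the statement is the Claim_ definition above) =====
theorem idx_to_context_spec : Claim_equal_idx_to_context := by
  intro ft idx _ hpre
  obtain ⟨h0, hlen⟩ := hpre
  unfold Spec_idx_to_context idx_to_context idx_to_context_alt
  rw [if_pos hlen, if_pos hlen]
  set ps := PySem.Chars.splitOn ft.toList ['\n', '\n'] with hps
  simp only [pvStarts_eq ps [0] 0 (by simp) (by simp)]
  have hlenstarts : PySem.List.len ((0 : Int) :: pvTail 0 ps) - 1 = (ps.length : Int) := by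
    simp [PySem.List.len, pvTail_length]
  simp only [List.cons_append, List.nil_append] at hlenstarts ⊢
  rw [hlenstarts, PySem.List.pyRange_zero_natCast, PySem.List.foldl_append_singleton_eq_map,
      List.map_map]
  simp only [Function.comp_def, List.nil_append]
  rw [pvRanges_eq ps 0, pvScanA_eq idx ps 0 0 h0, pvScanB_eq idx ps 0 0]
  cases hh : pvHit idx ps 0 0 with
  | none => simp
  | some t =>
    obtain ⟨j, st, p⟩ := t
    obtain ⟨_, _, hidx, hget⟩ := pvHit_index idx ps 0 0 j st p hh
    simp only [Nat.sub_zero] at hidx hget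
    simp only [Option.map_some, Option.getD_some, hidx, PySem.List.pyGet?_natCast, hget]
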